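-- pv_equiv track=rewrite | github.com/Pesteves2002/Advent-of-Code | 2026/day03.py | count_voltage
-- ===== SOURCE A (Python) =====
-- def count_voltage(banks: list[list[int]], active_size: int) -> int:
--     total: int = 0
--     for bank in banks:
--         active: list[int] = [0] * active_size
--         for i, bat in enumerate(bank):
--             for j, a in enumerate(active):
--                 if bat > a and active_size - j < len(bank) - i + 1:
--                     active[j] = bat
--                     for k in range(j + 1, len(active)):
--                         active[k] = 0
--                     break
--
--         for i, val in enumerate(active):
--             total += (10 ** (active_size - i - 1)) * val
--
--     return total
-- ===== SOURCE B (Python) =====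
-- def count_voltage(banks: list[list[int]], active_size: int) -> int:
--     # slot-major greedy: for each output slot, take the max of the feasible window
--     total: int = 0
--     for bank in banks:
--         n = len(bank)
--         start = 0
--         for j in range(active_size):
--             hi = n - active_size + j + 1
--             digit = 0
--             if hi > start:
--                 w = bank[start:hi]
--                 m = max(w)
--                 if m > 0:
--                     digit = m
--                     start += w.index(m) + 1
--             total += 10 ** (active_size - j - 1) * digit
--     return total
-- ===== Notes on version B (the rewrite author's own statement) =====
-- stated objective: alternative
-- what changed: A processes each battery element-wise, rewriting a k-slot array (find first improvable slot, zero the tail); B computes each output slot directly as the maximum of its feasible window of the bank (slot-major greedy with a moving start pointer), never materialising the slot array.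
import Mathlib
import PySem

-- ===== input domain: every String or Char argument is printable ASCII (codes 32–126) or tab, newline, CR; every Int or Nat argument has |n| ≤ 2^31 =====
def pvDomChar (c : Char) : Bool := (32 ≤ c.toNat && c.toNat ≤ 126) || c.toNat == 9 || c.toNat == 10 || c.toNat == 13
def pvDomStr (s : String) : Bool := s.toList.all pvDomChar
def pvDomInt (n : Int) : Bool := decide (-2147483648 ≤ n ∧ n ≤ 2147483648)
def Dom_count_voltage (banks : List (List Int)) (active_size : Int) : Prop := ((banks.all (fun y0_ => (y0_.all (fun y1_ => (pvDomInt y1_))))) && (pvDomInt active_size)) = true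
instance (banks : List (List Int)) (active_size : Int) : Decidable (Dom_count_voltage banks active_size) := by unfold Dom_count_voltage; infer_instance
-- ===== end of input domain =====

-- B replaces A's element-major rewriting of a k-slot array by a slot-major
-- window-maximum greedy with a moving start pointer (objective: alternative).

-- ===== PORT A =====
-- inner 'for j, a in enumerate(active)' loop: finds the first improvable slot,
-- sets it to bat, zeroes the tail ('for k in range(j+1, len(active))') and breaks
def pvPlace (bat i n k : Int) : List Int → Int → List Int
  | [], _ => []
  | a :: rest, j =>
    if bat > a ∧ k - j < n - i + 1 then bat :: rest.map (fun _ => (0 : Int))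
    else a :: pvPlace bat i n k rest (j + 1)

def count_voltage (banks : List (List Int)) (active_size : Int) : Int :=
  banks.foldl
    (fun total bank =>
      -- active = [0] * active_size  (Python list repetition clamps a negative count to 0)
      let active := (PySem.List.enumerate bank 0).foldl
        (fun act q => pvPlace q.2 q.1 (bank.length : Int) active_size act 0)
        (List.replicate active_size.toNat 0)
      -- 10 ** (active_size - i - 1): the exponent is never negative when this loop runs, so toNat is exact
      (PySem.List.enumerate active 0).foldl
        (fun t q => t + 10 ^ (active_size - q.1 - 1).toNat * q.2) total)
    0

-- ===== PORT B =====
-- one slot of B: window w = bank[start : n-k+j+1]; digit = max(w) if positive, else 0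
def pvSlotB (bank : List Int) (k : Int) (st : Int × Int) (j : Int) : Int × Int :=
  let hi : Int := (bank.length : Int) - k + j + 1
  let w := PySem.List.slice bank (some st.1) (some hi)
  let dg : Int × Int :=   -- (digit, new start)
    if hi > st.1 then
      match PySem.List.max? w (fun y => y) with
      | some m =>
        if m > 0 then (m, st.1 + (((PySem.List.index? w m).getD 0 : Nat) : Int) + 1)
        else (0, st.1)
      | none => (0, st.1)   -- unreachable: the window is nonempty when 0 ≤ start < hi ≤ len
    else (0, st.1)
  -- 10 ** (active_size - j - 1): 0 ≤ j < k inside the loop, so toNat is exact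
  (dg.2, st.2 + 10 ^ (k - j - 1).toNat * dg.1)

def count_voltage_alt (banks : List (List Int)) (active_size : Int) : Int :=
  banks.foldl
    (fun total bank =>
      ((PySem.List.pyRange 0 active_size 1).foldl (pvSlotB bank active_size) (0, total)).2)
    0

-- ===== PRECONDITION & SPEC =====
def Spec_count_voltage (banks : List (List Int)) (active_size : Int) (out : Int) : Prop := out = count_voltage_alt banks active_size
instance (banks : List (List Int)) (active_size : Int) (out : Int) : Decidable (Spec_count_voltage banks active_size out) := by unfold Spec_count_voltage; infer_instance

-- ===== CLAIM (what is proved, stated in full; the proofs are below) =====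
def Claim_equal_count_voltage : Prop := ∀ (banks : List (List Int)) (active_size : Int), Dom_count_voltage banks active_size → Spec_count_voltage banks active_size (count_voltage banks active_size)

-- ===== LEMMAS AND PROOFS =====

def pvDigits (p : List Int) (n k : Int) : Int → Int → Nat → List Int
  | _, _, 0 => []
  | s, j, cnt + 1 =>
    let hi : Int := n - k + j + 1
    let w := PySem.List.slice p (some s) (some hi)
    if hi > s then
      match PySem.List.max? w (fun y => y) with
      | some m =>
        if m > 0 then
          m :: pvDigits p n k (s + (((PySem.List.index? w m).getD 0 : Nat) : Int) + 1) (j + 1) cnt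
        else 0 :: pvDigits p n k s (j + 1) cnt
      | none => 0 :: pvDigits p n k s (j + 1) cnt
    else 0 :: pvDigits p n k s (j + 1) cnt

theorem pvDigits_length (p : List Int) (n k : Int) :
    ∀ (cnt : Nat) (s j : Int), (pvDigits p n k s j cnt).length = cnt := by
  intro cnt
  induction cnt with
  | zero => intro s j; simp [pvDigits]
  | succ m ih =>
    intro s j
    rw [pvDigits]
    split
    · split
      · split <;> simp [ih]
      · simp [ih]
    · simp [ih]

theorem slice_nil_of_ge (p : List Int) (s hi : Int) (hs : 0 ≤ s) (hhi : 0 ≤ hi)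
    (h : (p.length : Int) ≤ s) : PySem.List.slice p (some s) (some hi) = [] := by
  rw [PySem.List.slice_toNat p hs hhi]
  have : p.length ≤ s.toNat := by omega
  simp [List.drop_eq_nil_of_le this]

theorem pvDigits_past_end (p : List Int) (n k : Int) :
    ∀ (cnt : Nat) (s j : Int), 0 ≤ s → (p.length : Int) ≤ s →
      pvDigits p n k s j cnt = List.replicate cnt 0 := by
  intro cnt
  induction cnt with
  | zero => intro s j _ _; simp [pvDigits]
  | succ m ih =>
    intro s j hs hlen
    rw [pvDigits]
    by_cases h : n - k + j + 1 > s
    · rw [if_pos h, slice_nil_of_ge p s _ hs (by omega) hlen]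
      have hm : PySem.List.max? ([] : List Int) (fun y : Int => y) = none := by
        rw [PySem.List.max?_eq_none_iff]
      rw [hm]
      simp [ih _ _ hs hlen, List.replicate_succ]
    · rw [if_neg h]
      simp [ih _ _ hs hlen, List.replicate_succ]

theorem pvDigits_nil (n k : Int) :
    ∀ (cnt : Nat) (s j : Int), 0 ≤ s → pvDigits [] n k s j cnt = List.replicate cnt 0 := by
  intro cnt s j hs
  exact pvDigits_past_end [] n k cnt s j hs (by simpa using hs)

def pvWSum (k : Int) : Int → List Int → Int
  | _, [] => 0
  | j, d :: ds => 10 ^ (k - j - 1).toNat * d + pvWSum k (j + 1) ds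

theorem pvSum_eq_pvWSum (k : Int) :
    ∀ (ds : List Int) (c total : Int),
      (PySem.List.enumerate ds c).foldl
        (fun t q => t + 10 ^ (k - q.1 - 1).toNat * q.2) total
        = total + pvWSum k c ds := by
  intro ds
  induction ds with
  | nil => intro c total; simp [pvWSum, PySem.List.enumerate]
  | cons d ds ih =>
    intro c total
    rw [PySem.List.enumerate_cons, List.foldl_cons, ih, pvWSum]
    ring

theorem pvSlotB_fold (bank : List Int) (k : Int) :
    ∀ (cnt : Nat) (j s total : Int), (k - j).toNat = cnt →
      ((PySem.List.pyRange j k 1).foldl (pvSlotB bank k) (s, total)).2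
        = total + pvWSum k j (pvDigits bank (bank.length : Int) k s j cnt) := by
  intro cnt
  induction cnt with
  | zero =>
    intro j s total hcnt
    rw [PySem.List.pyRange_one_eq_nil (by omega)]
    simp [pvDigits, pvWSum]
  | succ m ih =>
    intro j s total hcnt
    rw [PySem.List.pyRange_one_cons (by omega), List.foldl_cons]
    simp only [pvDigits, pvSlotB]
    by_cases h : (bank.length : Int) - k + j + 1 > s
    · simp only [if_pos h]
      cases hmx : PySem.List.max? (PySem.List.slice bank (some s) (some ((bank.length : Int) - k + j + 1))) (fun y => y) with
      | none =>
        dsimp only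
        rw [ih (j+1) s _ (by omega), pvWSum]
        ring
      | some mx =>
        dsimp only
        by_cases hpos : mx > 0
        · simp only [if_pos hpos]
          rw [ih (j+1) _ _ (by omega), pvWSum]
          ring
        · simp only [if_neg hpos]
          rw [ih (j+1) s _ (by omega), pvWSum]
          ring
    · simp only [if_neg h]
      rw [ih (j+1) s _ (by omega), pvWSum]
      ring

theorem pvSlice_append_frozen (p : List Int) (b : Int) {s hi : Int}
    (hs : 0 ≤ s) (hsh : s ≤ hi) (hhm : hi ≤ (p.length : Int)) :
    PySem.List.slice (p ++ [b]) (some s) (some hi) = PySem.List.slice p (some s) (some hi) := by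
  rw [PySem.List.slice_toNat _ hs (by omega), PySem.List.slice_toNat _ hs (by omega)]
  rw [List.drop_append_of_le_length (by omega)]
  rw [List.take_append_of_le_length (by simp; omega)]

theorem pvSlice_open (p : List Int) {s hi : Int}
    (hs : 0 ≤ s) (_hsm : s ≤ (p.length : Int)) (hm : (p.length : Int) < hi) :
    PySem.List.slice p (some s) (some hi) = p.drop s.toNat := by
  rw [PySem.List.slice_toNat _ hs (by omega)]
  exact List.take_of_length_le (by simp; omega)

theorem pvSlice_open_append (p : List Int) (b : Int) {s hi : Int}
    (hs : 0 ≤ s) (hsm : s ≤ (p.length : Int)) (hm : (p.length : Int) < hi) :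
    PySem.List.slice (p ++ [b]) (some s) (some hi) = p.drop s.toNat ++ [b] := by
  rw [PySem.List.slice_toNat _ hs (by omega)]
  rw [List.drop_append_of_le_length (by omega)]
  exact List.take_of_length_le (by simp; omega)

theorem pvMax_append (w : List Int) (b mx : Int)
    (h : PySem.List.max? w (fun y => y) = some mx) :
    PySem.List.max? (w ++ [b]) (fun y => y) = some (max mx b) := by
  cases w with
  | nil =>
    rw [(PySem.List.max?_eq_none_iff ([] : List Int) (fun y : Int => y)).mpr rfl] at h
    exact absurd h (by simp)
  | cons x t =>
    rw [PySem.List.max?_id_cons] at h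
    rw [List.cons_append, PySem.List.max?_id_cons, List.foldl_append]
    rw [Option.some_inj.mp h]
    simp

theorem pvIndex_getD_lt {w : List Int} {v : Int} (h : v ∈ w) :
    ((PySem.List.index? w v).getD 0) < w.length := by
  obtain ⟨i, hi⟩ := Option.isSome_iff_exists.mp ((PySem.List.index?_isSome_iff w v).mpr h)
  obtain ⟨pre, suf, hw, hlen, -⟩ := (PySem.List.index?_eq_some_iff w v i).mp hi
  rw [hi]
  simp [hw, ← hlen]

theorem pvSlice_len_le (p : List Int) {s hi : Int} (hs : 0 ≤ s) (hsh : s ≤ hi) :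
    ((PySem.List.slice p (some s) (some hi)).length : Int) ≤ hi - s := by
  rw [PySem.List.slice_toNat p hs (by omega)]
  simp [List.length_take]
  omega

theorem pvMap_zero (l : List Int) : l.map (fun _ => (0 : Int)) = List.replicate l.length 0 := by
  simp

theorem pvPlace_pvDigits (n k bat : Int) :
    ∀ (cnt : Nat) (p : List Int) (s j : Int), 0 ≤ s → s ≤ (p.length : Int) →
      pvPlace bat (p.length : Int) n k (pvDigits p n k s j cnt) j
        = pvDigits (p ++ [bat]) n k s j cnt := by
  intro cnt
  induction cnt with
  | zero => intro p s j _ _; simp [pvDigits, pvPlace]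
  | succ m ih =>
    intro p s j hs hsm
    simp only [pvDigits]
    by_cases hhs : n - k + j + 1 > s
    · simp only [if_pos hhs]
      by_cases hm : (p.length : Int) < n - k + j + 1
      · -- the window reaches past the prefix: the new element extends every window
        rw [pvSlice_open p hs hsm hm, pvSlice_open_append p bat hs hsm hm]
        cases hmx : PySem.List.max? (p.drop s.toNat) (fun y => y) with
        | none =>
          have hwnil : p.drop s.toNat = [] := (PySem.List.max?_eq_none_iff _ _).mp hmx
          have hsl : p.length ≤ s.toNat := List.drop_eq_nil_iff.mp hwnil
          rw [hwnil, List.nil_append, PySem.List.max?_id_cons]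
          simp only [List.foldl_nil]
          by_cases hb : bat > 0
          · simp only [if_pos hb]
            rw [pvPlace, if_pos ⟨hb, by omega⟩]
            rw [PySem.List.index?_cons_self]
            simp only [Option.getD_some, Nat.cast_zero]
            have hbound : (((p ++ [bat]).length : Nat) : Int) ≤ s + 0 + 1 := by
              simp; omega
            rw [pvDigits_past_end (p ++ [bat]) n k m (s + 0 + 1) (j + 1) (by omega) hbound]
            rw [pvMap_zero, pvDigits_length]
          · simp only [if_neg hb]
            rw [pvPlace, if_neg (by omega)]
            rw [ih p s (j + 1) hs hsm]
        | some mx =>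
          have hmem : mx ∈ p.drop s.toNat := PySem.List.max?_mem hmx
          have hmax : ∀ y ∈ p.drop s.toNat, y ≤ mx := PySem.List.max?_isMax hmx
          have hld : (List.drop s.toNat p).length = p.length - s.toNat := List.length_drop
          rw [pvMax_append _ bat mx hmx]
          by_cases hpos : mx > 0
          · simp only [if_pos hpos]
            by_cases hb : bat > mx
            · -- bat beats the whole window: A overwrites the slot and zeroes the tail
              rw [pvPlace, if_pos ⟨by omega, by omega⟩]
              rw [max_eq_right (le_of_lt hb), if_pos (by omega)]
              have hnot : bat ∉ p.drop s.toNat := fun hc => absurd (hmax bat hc) (by omega)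
              rw [PySem.List.index?_append_singleton_self _ bat hnot]
              simp only [Option.getD_some]
              have hbound : (((p ++ [bat]).length : Nat) : Int)
                  ≤ s + ((List.drop s.toNat p).length : Int) + 1 := by
                simp; omega
              rw [pvDigits_past_end (p ++ [bat]) n k m
                (s + ((List.drop s.toNat p).length : Int) + 1) (j + 1) (by omega) hbound]
              rw [pvMap_zero, pvDigits_length]
            · rw [pvPlace, if_neg (by omega)]
              rw [max_eq_left (by omega), if_pos hpos]
              rw [PySem.List.index?_append_of_mem [bat] hmem]
              have hlt : ((PySem.List.index? (p.drop s.toNat) mx).getD 0) < (p.drop s.toNat).length :=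
                pvIndex_getD_lt hmem
              rw [ih p _ (j + 1) (by omega) (by omega)]
          · simp only [if_neg hpos]
            by_cases hb : bat > 0
            · rw [pvPlace, if_pos ⟨by omega, by omega⟩]
              rw [max_eq_right (by omega), if_pos hb]
              have hnot : bat ∉ p.drop s.toNat := fun hc => absurd (hmax bat hc) (by omega)
              rw [PySem.List.index?_append_singleton_self _ bat hnot]
              simp only [Option.getD_some]
              have hbound : (((p ++ [bat]).length : Nat) : Int)
                  ≤ s + ((List.drop s.toNat p).length : Int) + 1 := by
                simp; omega
              rw [pvDigits_past_end (p ++ [bat]) n k m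
                (s + ((List.drop s.toNat p).length : Int) + 1) (j + 1) (by omega) hbound]
              rw [pvMap_zero, pvDigits_length]
            · rw [pvPlace, if_neg (by omega)]
              rw [if_neg (by omega)]
              rw [ih p s (j + 1) hs hsm]
      · -- the window lies inside the prefix: nothing changes at this slot
        rw [pvSlice_append_frozen p bat hs (by omega) (by omega)]
        cases hmx : PySem.List.max? (PySem.List.slice p (some s) (some (n - k + j + 1))) (fun y => y) with
        | none =>
          rw [pvPlace, if_neg (by omega)]
          rw [ih p s (j + 1) hs hsm]
        | some mx =>
          have hmem := PySem.List.max?_mem hmx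
          by_cases hpos : mx > 0
          · simp only [if_pos hpos]
            rw [pvPlace, if_neg (by omega)]
            have hlt : ((PySem.List.index? (PySem.List.slice p (some s) (some (n - k + j + 1))) mx).getD 0)
                < (PySem.List.slice p (some s) (some (n - k + j + 1))).length := pvIndex_getD_lt hmem
            have hlen := pvSlice_len_le p (s := s) (hi := n - k + j + 1) hs (by omega)
            rw [ih p _ (j + 1) (by omega) (by omega)]
          · simp only [if_neg hpos]
            rw [pvPlace, if_neg (by omega)]
            rw [ih p s (j + 1) hs hsm]
    · simp only [if_neg hhs]
      rw [pvPlace, if_neg (by omega)]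
      rw [ih p s (j + 1) hs hsm]

theorem pvActive_eq_pvDigits (n k : Int) :
    ∀ (p : List Int),
      (PySem.List.enumerate p 0).foldl
        (fun act q => pvPlace q.2 q.1 n k act 0) (List.replicate k.toNat 0)
        = pvDigits p n k 0 0 k.toNat := by
  intro p
  induction p using List.reverseRecOn with
  | nil =>
    rw [pvDigits_nil n k k.toNat 0 0 (by omega)]
    rfl
  | append_singleton p bat ih =>
    rw [PySem.List.enumerate_append, List.foldl_append, ih]
    rw [PySem.List.enumerate_cons, PySem.List.enumerate_nil]
    simp only [List.foldl_cons, List.foldl_nil, zero_add]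
    exact pvPlace_pvDigits n k bat k.toNat p 0 0 le_rfl (by omega)

theorem pvBank (k : Int) (bank : List Int) (total : Int) :
    (PySem.List.enumerate ((PySem.List.enumerate bank 0).foldl
        (fun act q => pvPlace q.2 q.1 (bank.length : Int) k act 0) (List.replicate k.toNat 0)) 0).foldl
      (fun t q => t + 10 ^ (k - q.1 - 1).toNat * q.2) total
    = ((PySem.List.pyRange 0 k 1).foldl (pvSlotB bank k) (0, total)).2 := by
  rw [pvActive_eq_pvDigits (bank.length : Int) k bank]
  rw [pvSum_eq_pvWSum]
  rw [pvSlotB_fold bank k k.toNat 0 0 total (by omega)]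

theorem pvFold_eq (k : Int) : ∀ (bs : List (List Int)) (total : Int),
    bs.foldl (fun total bank =>
      (PySem.List.enumerate ((PySem.List.enumerate bank 0).foldl
          (fun act q => pvPlace q.2 q.1 (bank.length : Int) k act 0) (List.replicate k.toNat 0)) 0).foldl
        (fun t q => t + 10 ^ (k - q.1 - 1).toNat * q.2) total) total
    = bs.foldl (fun total bank => ((PySem.List.pyRange 0 k 1).foldl (pvSlotB bank k) (0, total)).2) total := by
  intro bs
  induction bs with
  | nil => intro total; rfl
  | cons b t ihb =>
    intro total
    rw [List.foldl_cons, List.foldl_cons, pvBank, ihb]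

-- ===== VERDICT (by name: the statement is the Claim_ definition above) =====
theorem count_voltage_spec : Claim_equal_count_voltage := by
  intro banks active_size _
  exact pvFold_eq active_size banks 0
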